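-- pv_equiv track=rewrite | github.com/melodist/CodingPractice | src/programmers/DP_Card Game.py | solution
-- ===== SOURCE A (Python) =====
-- def solution(left, right):
--     l, r = len(left), len(right)
--     arr = [[0] * (l+1) for i in range(r+1)]
--
--     for i in reversed(range(r)):
--         for j in reversed(range(l)):
--             if left[j] > right[i]:
--                 arr[i][j] = arr[i+1][j] + right[i]
--             else:
--                 arr[i][j] = max(arr[i+1][j+1], arr[i][j+1])
--
--     return arr[0][0]
-- ===== SOURCE B (Python) =====
-- def solution(left, right):
--     # Top-down memoized evaluation of the game value, driven by an explicit
--     # work stack (iterative DFS) instead of filling a bottom-up table.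
--     l, r = len(left), len(right)
--     memo = {}
--
--     def val(i, j):
--         return 0 if i == r or j == l else memo[(i, j)]
--
--     stack = [(0, 0, False)]
--     while stack:
--         i, j, expanded = stack.pop()
--         if i == r or j == l or (i, j) in memo:
--             continue
--         if expanded:
--             if left[j] > right[i]:
--                 memo[(i, j)] = val(i + 1, j) + right[i]
--             else:
--                 memo[(i, j)] = max(val(i + 1, j + 1), val(i, j + 1))
--         else:
--             stack.append((i, j, True))
--             if left[j] > right[i]:
--                 stack.append((i + 1, j, False))
--             else:
--                 stack.append((i + 1, j + 1, False))
--                 stack.append((i, j + 1, False))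
--     return val(0, 0)
-- ===== Notes on version B (the rewrite author's own statement) =====
-- stated objective: alternative
-- what changed: Replaces A's bottom-up table fill (nested reversed index loops over a full (r+1)x(l+1) array) by lazy top-down evaluation of the recurrence: a memo dict plus an explicit work stack of (i,j,expanded) frames computes only the states reachable from (0,0), demand-driven DFS instead of sweeping every cell.
import Mathlib
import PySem

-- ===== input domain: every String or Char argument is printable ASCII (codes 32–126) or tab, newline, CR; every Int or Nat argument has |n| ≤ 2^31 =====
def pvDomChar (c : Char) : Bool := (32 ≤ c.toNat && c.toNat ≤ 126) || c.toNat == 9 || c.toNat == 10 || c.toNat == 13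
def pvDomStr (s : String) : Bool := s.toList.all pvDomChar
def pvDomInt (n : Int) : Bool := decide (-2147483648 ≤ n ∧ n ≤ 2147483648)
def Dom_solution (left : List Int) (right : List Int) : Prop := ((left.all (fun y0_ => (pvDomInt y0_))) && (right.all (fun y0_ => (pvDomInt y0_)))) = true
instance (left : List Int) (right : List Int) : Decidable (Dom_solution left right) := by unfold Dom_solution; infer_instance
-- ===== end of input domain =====

-- B replaces A's bottom-up table fill by lazy top-down evaluation of the same game value:
-- a memo dict and an explicit work stack of (i, j, expanded) frames (demand-driven DFS from
-- state (0,0)); same results, proved equal below.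

-- ===== PORT A =====
-- inner loop body: arr[i][j] = ...  (indices i, j are always in range, so getD equals Python's arr[i][j])
def solInner (left right : List Int) (i : Nat) (arr : List (List Int)) (j : Nat) : List (List Int) :=
  let v : Int :=
    if left.getD j 0 > right.getD i 0 then (arr.getD (i+1) []).getD j 0 + right.getD i 0
    else max ((arr.getD (i+1) []).getD (j+1) 0) ((arr.getD i []).getD (j+1) 0)
  arr.set i ((arr.getD i []).set j v)

-- 'for j in reversed(range(l)):'
def solOuter (left right : List Int) (arr : List (List Int)) (i : Nat) : List (List Int) :=
  ((List.range left.length).reverse).foldl (solInner left right i) arr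

def solution (left : List Int) (right : List Int) : Int :=
  let arr0 : List (List Int) :=
    (List.range (right.length + 1)).map (fun _ => List.replicate (left.length + 1) (0 : Int))
  let arr := ((List.range right.length).reverse).foldl (solOuter left right) arr0
  (arr.getD 0 []).getD 0 0

-- ===== PORT B =====
-- 'def val(i, j)': 0 at a base state, else the memo entry; the key is always present when
-- B's Python calls val (stack discipline, proved below), so getD encodes the lookup exactly.
def bVal (left right : List Int) (memo : PySem.Dict (Nat × Nat) Int) (i j : Nat) : Int :=
  if i = right.length ∨ j = left.length then 0 else memo.getD (i, j) 0

-- termination measure for the work-stack loop: an unexpanded frame can still expand a whole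
-- subtree, weight 3^(remaining i-steps + remaining j-steps + 1); an expanded frame only pops.
def bWeight (r l : Nat) (f : Nat × Nat × Bool) : Nat :=
  if f.2.2 then 1 else 3 ^ ((r - f.1) + (l - f.2.1) + 1)

def bMeasure (r l : Nat) (st : List (Nat × Nat × Bool)) : Nat := (st.map (bWeight r l)).sum

lemma bWeight_pos (r l : Nat) (f : Nat × Nat × Bool) : 1 ≤ bWeight r l f := by
  unfold bWeight
  split
  · exact le_refl 1
  · exact Nat.one_le_pow _ _ (Nat.succ_pos 2)

lemma bMeasure_cons (r l : Nat) (f : Nat × Nat × Bool) (st : List (Nat × Nat × Bool)) :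
    bMeasure r l (f :: st) = bWeight r l f + bMeasure r l st := rfl

lemma bPow_step (B M : Nat) (hB : 1 ≤ B) : B + (1 + M) < B * 3 + M := by omega

lemma bPow_step2 (B M : Nat) (hB : 1 ≤ B) : B * 3 + (B + (1 + M)) < B * 3 * 3 + M := by omega

lemma bSub_succ (r i a : Nat) (ha : r - i = a + 1) : r - (i + 1) = a := by
  rw [Nat.sub_succ, ha, Nat.pred_succ]

lemma bPush_then (r l i j : Nat) (hi : i < r) (hj : j < l) (st : List (Nat × Nat × Bool)) :
    bMeasure r l ((i+1, j, false) :: (i, j, true) :: st) < bMeasure r l ((i, j, false) :: st) := by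
  obtain ⟨a, ha⟩ : ∃ a, r - i = a + 1 :=
    ⟨r - i - 1, (Nat.succ_pred_eq_of_pos (Nat.sub_pos_of_lt hi)).symm⟩
  simp only [bMeasure_cons]
  show 3 ^ ((r - (i+1)) + (l - j) + 1) + (1 + bMeasure r l st)
      < 3 ^ ((r - i) + (l - j) + 1) + bMeasure r l st
  rw [bSub_succ r i a ha, ha,
    show a + 1 + (l - j) + 1 = (a + (l - j) + 1) + 1 from by
      rw [Nat.add_right_comm a 1 (l - j)],
    pow_succ 3 (a + (l - j) + 1)]
  exact bPow_step _ _ (Nat.one_le_pow _ _ (Nat.succ_pos 2))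

lemma bPush_else (r l i j : Nat) (hi : i < r) (hj : j < l) (st : List (Nat × Nat × Bool)) :
    bMeasure r l ((i, j+1, false) :: (i+1, j+1, false) :: (i, j, true) :: st)
      < bMeasure r l ((i, j, false) :: st) := by
  obtain ⟨a, ha⟩ : ∃ a, r - i = a + 1 :=
    ⟨r - i - 1, (Nat.succ_pred_eq_of_pos (Nat.sub_pos_of_lt hi)).symm⟩
  obtain ⟨b, hb⟩ : ∃ b, l - j = b + 1 :=
    ⟨l - j - 1, (Nat.succ_pred_eq_of_pos (Nat.sub_pos_of_lt hj)).symm⟩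
  simp only [bMeasure_cons]
  show 3 ^ ((r - i) + (l - (j+1)) + 1)
        + (3 ^ ((r - (i+1)) + (l - (j+1)) + 1) + (1 + bMeasure r l st))
      < 3 ^ ((r - i) + (l - j) + 1) + bMeasure r l st
  rw [bSub_succ r i a ha, bSub_succ l j b hb, ha, hb,
    show a + 1 + b + 1 = (a + b + 1) + 1 from by rw [Nat.add_right_comm a 1 b],
    show a + 1 + (b + 1) + 1 = ((a + b + 1) + 1) + 1 from by
      rw [Nat.add_right_comm a 1 (b + 1), ← Nat.add_assoc a b 1],
    pow_succ 3 (a + b + 1 + 1), pow_succ 3 (a + b + 1)]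
  exact bPow_step2 _ _ (Nat.one_le_pow _ _ (Nat.succ_pos 2))

-- the four decrease facts, as named lemmas so the loop's termination proofs are bare applications
lemma bDec_pop (r l : Nat) (f : Nat × Nat × Bool) (st : List (Nat × Nat × Bool)) :
    bMeasure r l st < bMeasure r l (f :: st) := by
  rw [bMeasure_cons]
  exact Nat.lt_add_of_pos_left (bWeight_pos r l f)

lemma bNot_le_1 {r l i j : Nat} {P : Prop} (h1 : ¬(r ≤ i ∨ l ≤ j ∨ P)) : i < r :=
  Nat.lt_of_not_le (fun hle => h1 (Or.inl hle))

lemma bNot_le_2 {r l i j : Nat} {P : Prop} (h1 : ¬(r ≤ i ∨ l ≤ j ∨ P)) : j < l :=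
  Nat.lt_of_not_le (fun hle => h1 (Or.inr (Or.inl hle)))

lemma bDec_then (r l i j : Nat) (P : Prop) (h1 : ¬(r ≤ i ∨ l ≤ j ∨ P))
    (st : List (Nat × Nat × Bool)) :
    bMeasure r l ((i+1, j, false) :: (i, j, true) :: st) < bMeasure r l ((i, j, false) :: st) :=
  bPush_then r l i j (bNot_le_1 h1) (bNot_le_2 h1) st

lemma bDec_else (r l i j : Nat) (P : Prop) (h1 : ¬(r ≤ i ∨ l ≤ j ∨ P))
    (st : List (Nat × Nat × Bool)) :
    bMeasure r l ((i, j+1, false) :: (i+1, j+1, false) :: (i, j, true) :: st)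
      < bMeasure r l ((i, j, false) :: st) :=
  bPush_else r l i j (bNot_le_1 h1) (bNot_le_2 h1) st

-- the 'while stack:' loop; the stack's top is the list head (Python appends/pops at the end).
-- Python tests 'i == r'; reachable frames always have i ≤ r, j ≤ l, so '≤' is the same test
-- (stated with ≤ so the measure argument is unconditional).
def bLoop (left right : List Int) (stack : List (Nat × Nat × Bool))
    (memo : PySem.Dict (Nat × Nat) Int) : PySem.Dict (Nat × Nat) Int :=
  match stack with
  | [] => memo
  | (i, j, exp) :: st =>
    if h1 : right.length ≤ i ∨ left.length ≤ j ∨ (memo.get? (i, j)).isSome then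
      bLoop left right st memo
    else match exp with
    | true =>
      bLoop left right st (memo.insert (i, j)
        (if left.getD j 0 > right.getD i 0
         then bVal left right memo (i+1) j + right.getD i 0
         else max (bVal left right memo (i+1) (j+1)) (bVal left right memo i (j+1))))
    | false =>
      if left.getD j 0 > right.getD i 0 then
        bLoop left right ((i+1, j, false) :: (i, j, true) :: st) memo
      else
        bLoop left right ((i, j+1, false) :: (i+1, j+1, false) :: (i, j, true) :: st) memo
termination_by bMeasure right.length left.length stack
decreasing_by
  · exact bDec_pop right.length left.length (i, j, exp) st
  · exact bDec_pop right.length left.length (i, j, true) st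
  · exact bDec_then right.length left.length i j _ h1 st
  · exact bDec_else right.length left.length i j _ h1 st

def solution_alt (left : List Int) (right : List Int) : Int :=
  bVal left right (bLoop left right [(0, 0, false)] PySem.Dict.empty) 0 0

-- ===== PRECONDITION & SPEC =====
def Spec_solution (left : List Int) (right : List Int) (out : Int) : Prop := out = solution_alt left right
instance (left : List Int) (right : List Int) (out : Int) : Decidable (Spec_solution left right out) := by unfold Spec_solution; infer_instance

-- ===== CLAIM (what is proved, stated in full; the proofs are below) =====
def Claim_equal_solution : Prop := ∀ (left : List Int) (right : List Int), Dom_solution left right → Spec_solution left right (solution left right)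

-- ===== LEMMAS AND PROOFS =====

-- the common recurrence both programs compute
def gF (left right : List Int) (i j : Nat) : Int :=
  if right.length ≤ i ∨ left.length ≤ j then 0
  else if left.getD j 0 > right.getD i 0 then gF left right (i+1) j + right.getD i 0
  else max (gF left right (i+1) (j+1)) (gF left right i (j+1))
termination_by (right.length - i) + (left.length - j)
decreasing_by all_goals omega

lemma gF_base {left right : List Int} {i j : Nat} (h : right.length ≤ i ∨ left.length ≤ j) :
    gF left right i j = 0 := by rw [gF]; simp [h]

lemma map_range_getD {α : Type} (f : Nat → α) (n b : Nat) (d : α) (h : b < n) :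
    (List.map f (List.range n)).getD b d = f b := by
  rw [List.getD_eq_getElem?_getD]
  simp [h]

lemma map_range_set {α : Type} (f : Nat → α) (n i : Nat) (v : α) :
    (List.map f (List.range n)).set i v
      = List.map (fun a => if a = i then v else f a) (List.range n) := by
  apply List.ext_getElem
  · simp
  · intro p h1 h2
    simp only [List.getElem_set, List.getElem_map, List.getElem_range]
    by_cases hpi : i = p
    · simp [hpi]
    · simp [hpi]
      exact fun h => absurd h.symm hpi

lemma range_reverse_succ (n : Nat) : (List.range (n+1)).reverse = n :: (List.range n).reverse := by
  rw [List.range_succ]; simp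

-- the DP table in functional form
def pvT (l r : Nat) (e : Nat → Nat → Int) : List (List Int) :=
  (List.range (r+1)).map (fun a => (List.range (l+1)).map (fun b => e a b))

lemma pvT_congr {l r : Nat} {e e' : Nat → Nat → Int}
    (h : ∀ a b, a < r+1 → b < l+1 → e a b = e' a b) : pvT l r e = pvT l r e' := by
  unfold pvT
  apply List.map_congr_left
  intro a ha
  apply List.map_congr_left
  intro b hb
  exact h a b (List.mem_range.mp ha) (List.mem_range.mp hb)

lemma pvT_row (l r : Nat) (e : Nat → Nat → Int) (a : Nat) (ha : a < r+1) :
    (pvT l r e).getD a [] = (List.range (l+1)).map (fun b => e a b) := by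
  unfold pvT; exact map_range_getD _ _ _ _ ha

lemma pvT_entry (l r : Nat) (e : Nat → Nat → Int) (a b : Nat) (ha : a < r+1) (hb : b < l+1) :
    ((pvT l r e).getD a []).getD b 0 = e a b := by
  rw [pvT_row _ _ _ _ ha, map_range_getD _ _ _ _ hb]

-- table contents after the outer loop has processed rows r-1 … i
def eOut (left right : List Int) (i a b : Nat) : Int :=
  if i ≤ a then gF left right a b else 0

-- table contents while the inner loop on row i has processed columns l-1 … j
def eIn (left right : List Int) (i j a b : Nat) : Int :=
  if a = i then (if j ≤ b then gF left right a b else 0) else eOut left right (i+1) a b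

lemma inner_step (left right : List Int) (i j : Nat)
    (hi : i < right.length) (hj : j < left.length) :
    solInner left right i (pvT left.length right.length (eIn left right i (j+1))) j
      = pvT left.length right.length (eIn left right i j) := by
  simp only [solInner]
  rw [pvT_entry _ _ _ (i+1) j (by omega) (by omega),
      pvT_entry _ _ _ (i+1) (j+1) (by omega) (by omega),
      pvT_entry _ _ _ i (j+1) (by omega) (by omega)]
  have e1 : eIn left right i (j+1) (i+1) j = gF left right (i+1) j := by
    unfold eIn eOut; rw [if_neg (by omega), if_pos (by omega)]
  have e2 : eIn left right i (j+1) (i+1) (j+1) = gF left right (i+1) (j+1) := by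
    unfold eIn eOut; rw [if_neg (by omega), if_pos (by omega)]
  have e3 : eIn left right i (j+1) i (j+1) = gF left right i (j+1) := by
    unfold eIn; rw [if_pos rfl, if_pos (by omega)]
  rw [e1, e2, e3]
  have hv : (if left.getD j 0 > right.getD i 0
        then gF left right (i+1) j + right.getD i 0
        else max (gF left right (i+1) (j+1)) (gF left right i (j+1)))
      = gF left right i j := by
    conv_rhs => rw [gF, if_neg (show ¬(right.length ≤ i ∨ left.length ≤ j) by omega)]
  rw [hv]
  rw [pvT_row _ _ _ i (by omega), map_range_set]
  unfold pvT
  rw [map_range_set]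
  apply List.map_congr_left
  intro a ha
  rw [List.mem_range] at ha
  by_cases hai : a = i
  · subst hai
    rw [if_pos rfl]
    apply List.map_congr_left
    intro b hb
    rw [List.mem_range] at hb
    by_cases hbj : b = j
    · subst hbj
      rw [if_pos rfl]
      unfold eIn
      rw [if_pos rfl, if_pos (by omega)]
    · rw [if_neg hbj]
      unfold eIn
      rw [if_pos rfl, if_pos rfl]
      by_cases hjb : j ≤ b
      · rw [if_pos (by omega), if_pos hjb]
      · rw [if_neg (by omega), if_neg hjb]
  · rw [if_neg hai]
    apply List.map_congr_left
    intro b _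
    unfold eIn
    rw [if_neg hai, if_neg hai]

lemma inner_fold (left right : List Int) (i : Nat) (hi : i < right.length) :
    ∀ j, j ≤ left.length →
      ((List.range j).reverse).foldl (solInner left right i)
          (pvT left.length right.length (eIn left right i j))
        = pvT left.length right.length (eIn left right i 0) := by
  intro j
  induction j with
  | zero => intro _; simp
  | succ j ih =>
    intro hle
    rw [range_reverse_succ, List.foldl_cons, inner_step left right i j hi (by omega)]
    exact ih (by omega)

lemma outer_step (left right : List Int) (i : Nat) (hi : i < right.length) :
    solOuter left right (pvT left.length right.length (eOut left right (i+1))) i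
      = pvT left.length right.length (eOut left right i) := by
  unfold solOuter
  have h1 : pvT left.length right.length (eOut left right (i+1))
      = pvT left.length right.length (eIn left right i left.length) := by
    apply pvT_congr
    intro a b ha hb
    unfold eIn
    by_cases hai : a = i
    · subst hai
      rw [if_pos rfl]
      unfold eOut
      rw [if_neg (by omega)]
      by_cases hbl : left.length ≤ b
      · rw [if_pos hbl, gF_base (Or.inr hbl)]
      · rw [if_neg hbl]
    · rw [if_neg hai]
  rw [h1, inner_fold left right i hi left.length (le_refl _)]
  apply pvT_congr
  intro a b ha hb
  unfold eIn eOut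
  by_cases hai : a = i
  · subst hai
    rw [if_pos rfl, if_pos (by omega), if_pos (by omega)]
  · rw [if_neg hai]
    by_cases hia : i+1 ≤ a
    · rw [if_pos hia, if_pos (by omega)]
    · rw [if_neg hia, if_neg (by omega)]

lemma outer_fold (left right : List Int) :
    ∀ i, i ≤ right.length →
      ((List.range i).reverse).foldl (solOuter left right)
          (pvT left.length right.length (eOut left right i))
        = pvT left.length right.length (eOut left right 0) := by
  intro i
  induction i with
  | zero => intro _; simp
  | succ i ih =>
    intro hle
    rw [range_reverse_succ, List.foldl_cons, outer_step left right i (by omega)]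
    exact ih (by omega)

lemma solution_eq_gF (left right : List Int) : solution left right = gF left right 0 0 := by
  simp only [solution]
  have h0 : (List.range (right.length + 1)).map (fun _ => List.replicate (left.length + 1) (0:Int))
      = pvT left.length right.length (eOut left right right.length) := by
    unfold pvT
    apply List.map_congr_left
    intro a ha
    rw [List.mem_range] at ha
    rw [show List.replicate (left.length+1) (0:Int) = (List.range (left.length+1)).map (fun _ => (0:Int)) by
      rw [List.map_const', List.length_range]]
    apply List.map_congr_left
    intro b hb
    unfold eOut
    by_cases h : right.length ≤ a
    · rw [if_pos h, gF_base (Or.inl h)]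
    · rw [if_neg h]
  rw [h0, outer_fold left right right.length (le_refl _),
      pvT_entry _ _ _ 0 0 (by omega) (by omega)]
  unfold eOut
  rw [if_pos (by omega)]

-- ===== B-side proof: the stack machine computes gF =====

-- every memo entry is the game value of its state
def BGood (left right : List Int) (m : PySem.Dict (Nat × Nat) Int) : Prop :=
  ∀ i j v, m.get? (i, j) = some v → v = gF left right i j

-- the memo only grows
def BExt (m m' : PySem.Dict (Nat × Nat) Int) : Prop :=
  ∀ k v, m.get? k = some v → m'.get? k = some v

-- a state the loop no longer needs to work on
def BDone (left right : List Int) (m : PySem.Dict (Nat × Nat) Int) (i j : Nat) : Prop :=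
  right.length ≤ i ∨ left.length ≤ j ∨ (m.get? (i, j)).isSome

lemma bDone_mono {left right : List Int} {m m' : PySem.Dict (Nat × Nat) Int} {i j : Nat}
    (he : BExt m m') (h : BDone left right m i j) : BDone left right m' i j := by
  rcases h with h | h | h
  · exact Or.inl h
  · exact Or.inr (Or.inl h)
  · obtain ⟨v, hv⟩ := Option.isSome_iff_exists.mp h
    exact Or.inr (Or.inr (Option.isSome_iff_exists.mpr ⟨v, he _ _ hv⟩))

lemma bVal_of_done {left right : List Int} {m : PySem.Dict (Nat × Nat) Int} {i j : Nat}
    (hg : BGood left right m) (hd : BDone left right m i j) :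
    bVal left right m i j = gF left right i j := by
  unfold bVal
  by_cases hb : i = right.length ∨ j = left.length
  · rw [if_pos hb, gF_base (by omega)]
  · rw [if_neg hb]
    cases hm : m.get? (i, j) with
    | some v =>
      rw [PySem.Dict.getD_of_get?_eq_some _ _ hm]
      exact hg i j v hm
    | none =>
      rw [PySem.Dict.getD_of_get?_eq_none _ _ hm]
      have : right.length ≤ i ∨ left.length ≤ j := by
        rcases hd with h | h | h
        · exact Or.inl h
        · exact Or.inr h
        · rw [hm] at h; simp at h
      rw [gF_base this]

lemma bLoop_nil (left right : List Int) (m : PySem.Dict (Nat × Nat) Int) :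
    bLoop left right [] m = m := by rw [bLoop.eq_def]

lemma bLoop_done {left right : List Int} {m : PySem.Dict (Nat × Nat) Int} {i j : Nat}
    {exp : Bool} {st : List (Nat × Nat × Bool)}
    (h : right.length ≤ i ∨ left.length ≤ j ∨ (m.get? (i, j)).isSome) :
    bLoop left right ((i, j, exp) :: st) m = bLoop left right st m := by
  rw [bLoop.eq_def]; dsimp only; rw [dif_pos h]

lemma bLoop_true {left right : List Int} {m : PySem.Dict (Nat × Nat) Int} {i j : Nat}
    {st : List (Nat × Nat × Bool)}
    (h : ¬(right.length ≤ i ∨ left.length ≤ j ∨ (m.get? (i, j)).isSome)) :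
    bLoop left right ((i, j, true) :: st) m
      = bLoop left right st (m.insert (i, j)
          (if left.getD j 0 > right.getD i 0
           then bVal left right m (i+1) j + right.getD i 0
           else max (bVal left right m (i+1) (j+1)) (bVal left right m i (j+1)))) := by
  rw [bLoop.eq_def]; dsimp only; rw [dif_neg h]

lemma bLoop_false_then {left right : List Int} {m : PySem.Dict (Nat × Nat) Int} {i j : Nat}
    {st : List (Nat × Nat × Bool)}
    (h : ¬(right.length ≤ i ∨ left.length ≤ j ∨ (m.get? (i, j)).isSome))
    (hc : left.getD j 0 > right.getD i 0) :
    bLoop left right ((i, j, false) :: st) m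
      = bLoop left right ((i+1, j, false) :: (i, j, true) :: st) m := by
  rw [bLoop.eq_def]; dsimp only; rw [dif_neg h]; rw [if_pos hc]

lemma bLoop_false_else {left right : List Int} {m : PySem.Dict (Nat × Nat) Int} {i j : Nat}
    {st : List (Nat × Nat × Bool)}
    (h : ¬(right.length ≤ i ∨ left.length ≤ j ∨ (m.get? (i, j)).isSome))
    (hc : ¬(left.getD j 0 > right.getD i 0)) :
    bLoop left right ((i, j, false) :: st) m
      = bLoop left right ((i, j+1, false) :: (i+1, j+1, false) :: (i, j, true) :: st) m := by
  rw [bLoop.eq_def]; dsimp only; rw [dif_neg h]; rw [if_neg hc]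

-- main invariant: running one unexpanded frame finishes its whole subtree
lemma bLoop_frame (left right : List Int) :
    ∀ n i j (st : List (Nat × Nat × Bool)) (m : PySem.Dict (Nat × Nat) Int),
      bWeight right.length left.length (i, j, false) ≤ n → BGood left right m →
      ∃ m', bLoop left right ((i, j, false) :: st) m = bLoop left right st m'
        ∧ BGood left right m' ∧ BExt m m' ∧ BDone left right m' i j := by
  intro n
  induction n using Nat.strong_induction_on with
  | _ n ih =>
    intro i j st m hw hg
    by_cases hd : right.length ≤ i ∨ left.length ≤ j ∨ (m.get? (i, j)).isSome
    · exact ⟨m, bLoop_done hd, hg, fun _ _ h => h, hd⟩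
    · push Not at hd
      obtain ⟨hi, hj, _⟩ := hd
      have hd' : ¬(right.length ≤ i ∨ left.length ≤ j ∨ (m.get? (i, j)).isSome) := by
        push Not; exact ⟨hi, hj, by assumption⟩
      have hgFij : ¬(right.length ≤ i ∨ left.length ≤ j) := by omega
      -- weight bookkeeping
      obtain ⟨a, ha⟩ : ∃ a, right.length - i = a + 1 := ⟨right.length - i - 1, by omega⟩
      obtain ⟨b, hb⟩ : ∃ b, left.length - j = b + 1 := ⟨left.length - j - 1, by omega⟩
      have hwn : 3 ^ ((a + 1) + (b + 1) + 1) ≤ n := by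
        have : bWeight right.length left.length (i, j, false) = 3 ^ ((a+1) + (b+1) + 1) := by
          simp [bWeight, ha, hb]
        omega
      have hpow : ∀ c : Nat, c < (a + 1) + (b + 1) + 1 → 3 ^ c < n := by
        intro c hc
        calc 3 ^ c < 3 ^ ((a + 1) + (b + 1) + 1) := Nat.pow_lt_pow_right (by norm_num) hc
        _ ≤ n := hwn
      by_cases hc : left.getD j 0 > right.getD i 0
      · -- forced branch: one dependency (i+1, j)
        rw [bLoop_false_then hd' hc]
        have hw1 : bWeight right.length left.length (i+1, j, false)
            ≤ 3 ^ (a + (b + 1) + 1) := by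
          simp [bWeight, show right.length - (i+1) = a by omega, hb]
        obtain ⟨m1, he1, hg1, hx1, hdn1⟩ :=
          ih (3 ^ (a + (b + 1) + 1)) (hpow _ (by omega)) (i+1) j ((i, j, true) :: st) m hw1 hg
        rw [he1]
        by_cases hd1 : right.length ≤ i ∨ left.length ≤ j ∨ (m1.get? (i, j)).isSome
        · refine ⟨m1, bLoop_done hd1, hg1, hx1, ?_⟩
          rcases hd1 with h | h | h
          · omega
          · omega
          · exact Or.inr (Or.inr h)
        · rw [bLoop_true hd1, if_pos hc]
          have hv : bVal left right m1 (i+1) j + right.getD i 0 = gF left right i j := by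
            rw [bVal_of_done hg1 hdn1]
            conv_rhs => rw [gF, if_neg hgFij, if_pos hc]
          rw [hv]
          refine ⟨m1.insert (i, j) (gF left right i j), rfl, ?_, ?_, ?_⟩
          · intro i' j' v hv'
            rw [PySem.Dict.get?_insert] at hv'
            split at hv'
            · rename_i hk
              rw [Prod.mk.injEq] at hk
              obtain ⟨hk1, hk2⟩ := hk
              subst hk1; subst hk2
              injection hv' with h
              exact h.symm
            · exact hg1 i' j' v hv'
          · intro k v hk
            have hnone : m1.get? (i, j) = none := by
              push Not at hd1
              exact Option.not_isSome_iff_eq_none.mp hd1.2.2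
            have hk2 := hx1 _ _ hk
            have hne : k ≠ (i, j) := fun h => by rw [h, hnone] at hk2; cases hk2
            rw [PySem.Dict.get?_insert, if_neg hne]
            exact hk2
          · exact Or.inr (Or.inr
              (Option.isSome_iff_exists.mpr ⟨_, PySem.Dict.get?_insert_self _ _ _⟩))
      · -- choice branch: two dependencies (i, j+1) and (i+1, j+1)
        rw [bLoop_false_else hd' hc]
        have hw1 : bWeight right.length left.length (i, j+1, false)
            ≤ 3 ^ ((a + 1) + b + 1) := by
          simp [bWeight, ha, show left.length - (j+1) = b by omega]
        obtain ⟨m1, he1, hg1, hx1, hdn1⟩ :=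
          ih (3 ^ ((a + 1) + b + 1)) (hpow _ (by omega)) i (j+1)
            ((i+1, j+1, false) :: (i, j, true) :: st) m hw1 hg
        rw [he1]
        have hw2 : bWeight right.length left.length (i+1, j+1, false)
            ≤ 3 ^ (a + b + 1) := by
          simp [bWeight, show right.length - (i+1) = a by omega,
            show left.length - (j+1) = b by omega]
        obtain ⟨m2, he2, hg2, hx2, hdn2⟩ :=
          ih (3 ^ (a + b + 1)) (hpow _ (by omega)) (i+1) (j+1) ((i, j, true) :: st) m1 hw2 hg1
        rw [he2]
        have hdn1' : BDone left right m2 i (j+1) := bDone_mono hx2 hdn1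
        have hxm2 : BExt m m2 := fun k v h => hx2 _ _ (hx1 _ _ h)
        by_cases hd1 : right.length ≤ i ∨ left.length ≤ j ∨ (m2.get? (i, j)).isSome
        · refine ⟨m2, bLoop_done hd1, hg2, hxm2, ?_⟩
          rcases hd1 with h | h | h
          · omega
          · omega
          · exact Or.inr (Or.inr h)
        · rw [bLoop_true hd1, if_neg hc]
          have hv : max (bVal left right m2 (i+1) (j+1)) (bVal left right m2 i (j+1))
              = gF left right i j := by
            rw [bVal_of_done hg2 hdn2, bVal_of_done hg2 hdn1']
            conv_rhs => rw [gF, if_neg hgFij, if_neg hc]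
          rw [hv]
          refine ⟨m2.insert (i, j) (gF left right i j), rfl, ?_, ?_, ?_⟩
          · intro i' j' v hv'
            rw [PySem.Dict.get?_insert] at hv'
            split at hv'
            · rename_i hk
              rw [Prod.mk.injEq] at hk
              obtain ⟨hk1, hk2⟩ := hk
              subst hk1; subst hk2
              injection hv' with h
              exact h.symm
            · exact hg2 i' j' v hv'
          · intro k v hk
            have hnone : m2.get? (i, j) = none := by
              push Not at hd1
              exact Option.not_isSome_iff_eq_none.mp hd1.2.2
            have hk2 := hxm2 _ _ hk
            have hne : k ≠ (i, j) := fun h => by rw [h, hnone] at hk2; cases hk2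
            rw [PySem.Dict.get?_insert, if_neg hne]
            exact hk2
          · exact Or.inr (Or.inr
              (Option.isSome_iff_exists.mpr ⟨_, PySem.Dict.get?_insert_self _ _ _⟩))

lemma solution_alt_eq_gF (left right : List Int) :
    solution_alt left right = gF left right 0 0 := by
  unfold solution_alt
  have hg0 : BGood left right PySem.Dict.empty := by
    intro i j v h
    rw [PySem.Dict.get?_empty (i, j)] at h
    cases h
  obtain ⟨m', he, hg, _, hd⟩ :=
    bLoop_frame left right (bWeight right.length left.length (0, 0, false)) 0 0 []
      PySem.Dict.empty (le_refl _) hg0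
  rw [he, bLoop_nil]
  exact bVal_of_done hg hd

-- ===== VERDICT (by name: the statement is the Claim_ definition above) =====
theorem solution_spec : Claim_equal_solution := by
  intro left right _
  unfold Spec_solution
  rw [solution_eq_gF, solution_alt_eq_gF]
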